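-- pv_equiv track=rewrite | github.com/Lupino/python-psql-utils | psql_utils/record_utils.py | sort_query
-- ===== SOURCE A (Python) =====
-- from typing import Optional, List, Dict, Any
--
-- def sort_query(
--     query: List[tuple[str, str, Any]],
--     sort_keys: List[str],
-- ) -> List[tuple[str, str, Any]]:
--     ret = []
--     for key in sort_keys:
--         other = []
--         for q in query:
--             if q[0] == key:
--                 ret.append(q)
--             else:
--                 other.append(q)
--
--         query = other
--
--     return ret + query
-- ===== SOURCE B (Python) =====
-- def sort_query(query, sort_keys):
--     keyset = set(sort_keys)
--     groups = {}
--     rest = []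
--     for q in query:
--         if q[0] in keyset:
--             groups.setdefault(q[0], []).append(q)
--         else:
--             rest.append(q)
--     out = []
--     for k in sort_keys:
--         out.extend(groups.pop(k, []))
--     return out + rest
-- ===== Notes on version B (the rewrite author's own statement) =====
-- stated objective: faster
-- what changed: Instead of one full pass over the (shrinking) query list per sort key, B makes a single grouping pass over query into a dict keyed by first element, then emits the groups in sort_keys order followed by the ungrouped remainder.
import Mathlib
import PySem

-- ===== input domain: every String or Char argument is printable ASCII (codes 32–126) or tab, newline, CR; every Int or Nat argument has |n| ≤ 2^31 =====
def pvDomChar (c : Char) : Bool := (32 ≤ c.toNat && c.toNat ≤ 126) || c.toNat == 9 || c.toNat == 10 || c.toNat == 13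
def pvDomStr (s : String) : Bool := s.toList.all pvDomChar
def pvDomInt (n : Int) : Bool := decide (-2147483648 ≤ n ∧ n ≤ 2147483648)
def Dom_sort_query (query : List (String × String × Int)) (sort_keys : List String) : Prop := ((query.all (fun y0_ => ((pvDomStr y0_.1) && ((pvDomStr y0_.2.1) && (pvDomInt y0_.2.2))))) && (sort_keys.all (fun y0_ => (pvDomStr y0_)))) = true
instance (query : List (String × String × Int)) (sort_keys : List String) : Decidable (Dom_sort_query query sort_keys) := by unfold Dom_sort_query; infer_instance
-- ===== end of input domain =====

-- B replaces A's repeated passes over a shrinking query (one pass per sort key) by a single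
-- grouping pass over query into a dict keyed by first element, then emits the groups in
-- sort_keys order followed by the ungrouped remainder (objective: faster, O(N+K) vs O(N*K)).

-- ===== PORT A =====
def sort_query (query : List (String × String × Int)) (sort_keys : List String) : List (String × String × Int) :=
  -- ret = []; for key in sort_keys: other = []; for q in query: …; query = other
  let st := sort_keys.foldl
    (fun (st : List (String × String × Int) × List (String × String × Int)) key =>
      st.2.foldl
        (fun (st2 : List (String × String × Int) × List (String × String × Int)) q =>
          if q.1 == key then (st2.1 ++ [q], st2.2) else (st2.1, st2.2 ++ [q]))
        (st.1, []))
    ([], query)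
  st.1 ++ st.2

-- ===== PORT B =====
def sort_query_alt (query : List (String × String × Int)) (sort_keys : List String) : List (String × String × Int) :=
  -- keyset = set(sort_keys); groups = {}; rest = []
  let keyset : PySem.Set String := PySem.Set.ofList sort_keys
  -- for q in query: if q[0] in keyset: groups.setdefault(q[0], []).append(q) else rest.append(q)
  let st := query.foldl
    (fun (st : PySem.Dict String (List (String × String × Int)) × List (String × String × Int)) q =>
      if keyset.contains q.1 then (st.1.modify q.1 [] (fun g => g ++ [q]), st.2)
      else (st.1, st.2 ++ [q]))
    (PySem.Dict.empty, [])
  -- out = []; for k in sort_keys: out.extend(groups.pop(k, []))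
  let st2 := sort_keys.foldl
    (fun (st2 : List (String × String × Int) × PySem.Dict String (List (String × String × Int))) k =>
      (st2.1 ++ st2.2.getD k [], st2.2.erase k))
    ([], st.1)
  st2.1 ++ st.2

-- ===== PRECONDITION & SPEC =====
def Spec_sort_query (query : List (String × String × Int)) (sort_keys : List String) (out : List (String × String × Int)) : Prop := out = sort_query_alt query sort_keys
instance (query : List (String × String × Int)) (sort_keys : List String) (out : List (String × String × Int)) : Decidable (Spec_sort_query query sort_keys out) := by unfold Spec_sort_query; infer_instance

-- ===== CLAIM (what is proved, stated in full; the proofs are below) =====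
def Claim_equal_sort_query : Prop := ∀ (query : List (String × String × Int)) (sort_keys : List String), Dom_sort_query query sort_keys → Spec_sort_query query sort_keys (sort_query query sort_keys)

-- ===== LEMMAS AND PROOFS =====

-- Reference recursion: process the keys one by one, splitting off the matching tuples.
def goA : List String → List (String × String × Int) → List (String × String × Int) × List (String × String × Int)
  | [], q => ([], q)
  | k :: ks, q =>
    let p := goA ks (q.filter (fun x => !(x.1 == k)))
    (q.filter (fun x => x.1 == k) ++ p.1, p.2)

-- A's inner loop over query is a partition by (· == key).
theorem innerA_eq (key : String) (q : List (String × String × Int))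
    (ret other : List (String × String × Int)) :
    q.foldl (fun (st2 : List (String × String × Int) × List (String × String × Int)) x =>
        if x.1 == key then (st2.1 ++ [x], st2.2) else (st2.1, st2.2 ++ [x])) (ret, other)
      = (ret ++ q.filter (fun x => x.1 == key), other ++ q.filter (fun x => !(x.1 == key))) := by
  induction q generalizing ret other with
  | nil => simp
  | cons x q ih =>
    rw [List.foldl_cons]
    by_cases h : x.1 = key
    · rw [if_pos (by simp [h]), ih]; simp [h]
    · rw [if_neg (by simp [h]), ih]; simp [h]

-- A's outer loop is goA with an accumulator.
theorem outerA_eq (ks : List String) (ret q : List (String × String × Int)) :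
    ks.foldl (fun (st : List (String × String × Int) × List (String × String × Int)) key =>
        st.2.foldl (fun (st2 : List (String × String × Int) × List (String × String × Int)) x =>
          if x.1 == key then (st2.1 ++ [x], st2.2) else (st2.1, st2.2 ++ [x])) (st.1, []))
        (ret, q)
      = (ret ++ (goA ks q).1, (goA ks q).2) := by
  induction ks generalizing ret q with
  | nil => simp [goA]
  | cons k ks ih =>
    rw [List.foldl_cons]
    show (ks.foldl _ (q.foldl _ (ret, ([] : List (String × String × Int))))) = _
    rw [innerA_eq, ih, goA]
    simp

theorem sort_query_eq_goA (query : List (String × String × Int)) (sort_keys : List String) :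
    sort_query query sort_keys = (goA sort_keys query).1 ++ (goA sort_keys query).2 := by
  unfold sort_query
  rw [outerA_eq]
  simp

-- find? in a list with the k-keyed entries filtered out (assoc-list core of Dict.erase).
theorem find?_filter_key (l : List (String × List (String × String × Int))) (k k' : String) :
    (l.filter (fun p => !(p.1 == k))).find? (fun p => p.1 == k')
      = if k' = k then none else l.find? (fun p => p.1 == k') := by
  induction l with
  | nil => simp
  | cons p l ih =>
    by_cases hpk : p.1 = k
    · rw [List.filter_cons_of_neg (by simp [hpk]), ih]
      by_cases h : k' = k
      · simp [h]
      · rw [if_neg h, List.find?_cons_of_neg (by simp [hpk, Ne.symm h]), if_neg h]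
    · rw [List.filter_cons_of_pos (by simp [hpk])]
      by_cases hpk' : p.1 = k'
      · rw [List.find?_cons_of_pos (by simp [hpk']), if_neg (by rintro rfl; exact hpk hpk'),
          List.find?_cons_of_pos (by simp [hpk'])]
      · rw [List.find?_cons_of_neg (by simp [hpk']), ih, List.find?_cons_of_neg (by simp [hpk'])]

-- getD after erase (the only fact about Dict.erase the proof needs).
theorem getD_erase (d : PySem.Dict String (List (String × String × Int))) (k k' : String) :
    (d.erase k).getD k' [] = if k' = k then [] else d.getD k' [] := by
  unfold PySem.Dict.getD PySem.Dict.get? PySem.Dict.erase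
  rw [find?_filter_key]
  by_cases h : k' = k <;> simp [h]

-- B's grouping pass, group component: for a key in the key set, it collects the matching tuples.
theorem phase1_getD (keyset : PySem.Set String) (k : String) (hk : keyset.contains k = true)
    (q : List (String × String × Int))
    (g : PySem.Dict String (List (String × String × Int))) (r : List (String × String × Int)) :
    ((q.foldl (fun (st : PySem.Dict String (List (String × String × Int)) × List (String × String × Int)) x =>
        if keyset.contains x.1 then (st.1.modify x.1 [] (fun gr => gr ++ [x]), st.2)
        else (st.1, st.2 ++ [x])) (g, r)).1).getD k []
      = g.getD k [] ++ q.filter (fun x => x.1 == k) := by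
  induction q generalizing g r with
  | nil => simp
  | cons x q ih =>
    rw [List.foldl_cons]
    by_cases h : x.1 = k
    · rw [if_pos (by rw [h]; exact hk), ih, PySem.Dict.getD_modify, if_pos h.symm, h,
        List.filter_cons_of_pos (by simp [h])]
      simp
    · by_cases hc : keyset.contains x.1 = true
      · rw [if_pos hc, ih, PySem.Dict.getD_modify, if_neg (Ne.symm h)]
        simp [h]
      · rw [if_neg hc, ih]
        simp [h]

-- B's grouping pass, rest component: the tuples whose key is not in the key set, in order.
theorem phase1_rest (keyset : PySem.Set String) (q : List (String × String × Int))
    (g : PySem.Dict String (List (String × String × Int))) (r : List (String × String × Int)) :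
    (q.foldl (fun (st : PySem.Dict String (List (String × String × Int)) × List (String × String × Int)) x =>
        if keyset.contains x.1 then (st.1.modify x.1 [] (fun gr => gr ++ [x]), st.2)
        else (st.1, st.2 ++ [x])) (g, r)).2
      = r ++ q.filter (fun x => !keyset.contains x.1) := by
  induction q generalizing g r with
  | nil => simp
  | cons x q ih =>
    rw [List.foldl_cons]
    by_cases hc : keyset.contains x.1 = true
    · rw [if_pos hc, ih, List.filter_cons_of_neg (by simpa using hc)]
    · rw [if_neg hc, ih, List.filter_cons_of_pos (by simpa using hc)]
      simp

-- Reference recursion for B's emission loop.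
def outB : List String → PySem.Dict String (List (String × String × Int)) → List (String × String × Int)
  | [], _ => []
  | k :: ks, g => g.getD k [] ++ outB ks (g.erase k)

theorem phase2_fst (ks : List String) (out : List (String × String × Int))
    (g : PySem.Dict String (List (String × String × Int))) :
    (ks.foldl (fun (st2 : List (String × String × Int) × PySem.Dict String (List (String × String × Int))) k =>
        (st2.1 ++ st2.2.getD k [], st2.2.erase k)) (out, g)).1
      = out ++ outB ks g := by
  induction ks generalizing out g with
  | nil => simp [outB]
  | cons k ks ih =>
    rw [List.foldl_cons]
    show (ks.foldl _ (out ++ g.getD k [], g.erase k)).1 = _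
    rw [ih, outB]
    simp

-- Bridge: if g holds exactly the groups of q (for the keys still to be emitted),
-- then B's emission loop produces A's emitted list.
theorem outB_eq_goA (ks : List String) (g : PySem.Dict String (List (String × String × Int)))
    (q : List (String × String × Int))
    (h : ∀ k ∈ ks, g.getD k [] = q.filter (fun x => x.1 == k)) :
    outB ks g = (goA ks q).1 := by
  induction ks generalizing g q with
  | nil => simp [outB, goA]
  | cons k ks ih =>
    have hk := h k (by simp)
    have hrec : outB ks (g.erase k) = (goA ks (q.filter (fun x => !(x.1 == k)))).1 := by
      apply ih
      intro k' hk'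
      rw [getD_erase]
      by_cases hkk : k' = k
      · rw [if_pos hkk, hkk, List.filter_filter]
        refine ((List.filter_eq_nil_iff).mpr ?_).symm
        intro x _
        simp
      · rw [if_neg hkk, h k' (by simp [hk']), List.filter_filter]
        apply List.filter_congr
        intro x _
        by_cases hx : x.1 = k' <;> simp [hx, hkk]
    rw [outB, goA, hk, hrec]

-- A's final remainder: the tuples whose key appears in none of the sort keys.
theorem goA_snd (ks : List String) (q : List (String × String × Int)) :
    (goA ks q).2 = q.filter (fun x => !decide (x.1 ∈ ks)) := by
  induction ks generalizing q with
  | nil => simp [goA]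
  | cons k ks ih =>
    rw [goA]
    show (goA ks (q.filter (fun x => !(x.1 == k)))).2 = _
    rw [ih, List.filter_filter]
    apply List.filter_congr
    intro x _
    by_cases hx : x.1 = k <;> simp [hx]

theorem main_eq (query : List (String × String × Int)) (sort_keys : List String) :
    sort_query query sort_keys = sort_query_alt query sort_keys := by
  rw [sort_query_eq_goA]
  simp only [sort_query_alt]
  rw [phase2_fst, phase1_rest]
  have hout : outB sort_keys
      ((query.foldl (fun (st : PySem.Dict String (List (String × String × Int)) × List (String × String × Int)) q =>
          if (PySem.Set.ofList sort_keys).contains q.1 then (st.1.modify q.1 [] (fun g => g ++ [q]), st.2)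
          else (st.1, st.2 ++ [q])) (PySem.Dict.empty, [])).1)
      = (goA sort_keys query).1 := by
    apply outB_eq_goA
    intro k hk
    rw [phase1_getD _ k (by simp [hk])]
    simp
  rw [hout, goA_snd]
  have hrest : query.filter (fun x => !(PySem.Set.ofList sort_keys).contains x.1)
      = query.filter (fun x => !decide (x.1 ∈ sort_keys)) := by
    apply List.filter_congr
    intro x _
    by_cases hx : x.1 ∈ sort_keys <;> simp [hx]
  rw [hrest]
  simp

-- ===== VERDICT (by name: the statement is the Claim_ definition above) =====
theorem sort_query_spec : Claim_equal_sort_query := by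
  intro query sort_keys _
  unfold Spec_sort_query
  exact main_eq query sort_keys
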